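-- pv_equiv track=rewrite | github.com/roytian1992/ResearchForesight | src/researchworld/content.py | choose_main_tex_file
-- ===== SOURCE A (Python) =====
-- from typing import Dict, Iterable, List, Tuple
--
-- def choose_main_tex_file(files: Dict[str, str]) -> Tuple[str, str]:
--     scored: List[Tuple[int, int, str, str]] = []
--     for name, text in files.items():
--         if not name.lower().endswith(".tex"):
--             continue
--         score = 0
--         lowered_name = name.lower()
--         lowered_text = text.lower()
--         if "\\begin{document}" in lowered_text:
--             score += 100
--         if "\\title" in lowered_text:
--             score += 15
--         if "\\abstract" in lowered_text or "\\begin{abstract}" in lowered_text: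
--             score += 10
--         if "main" in lowered_name:
--             score += 8
--         scored.append((score, len(text), name, text))
--     if not scored:
--         raise ValueError("No TeX file found in source archive")
--     scored.sort(reverse=True)
--     _, _, name, text = scored[0]
--     return name, text
-- ===== SOURCE B (Python) =====
-- from typing import Dict, Tuple
--
-- def _score(name: str, text: str) -> int:
--     lowered_name = name.lower()
--     lowered_text = text.lower()
--     return (
--         (100 if "\\begin{document}" in lowered_text else 0)
--         + (15 if "\\title" in lowered_text else 0)
--         + (10 if "\\abstract" in lowered_text or "\\begin{abstract}" in lowered_text else 0)
--         + (8 if "main" in lowered_name else 0)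
--     )
--
-- def choose_main_tex_file(files: Dict[str, str]) -> Tuple[str, str]:
--     best = None
--     for name, text in files.items():
--         if not name.lower().endswith(".tex"):
--             continue
--         cand = (_score(name, text), len(text), name, text)
--         if best is None or cand > best:
--             best = cand
--     if best is None:
--         raise ValueError("No TeX file found in source archive")
--     _, _, name, text = best
--     return name, text
-- ===== Notes on version B (the rewrite author's own statement) =====
-- stated objective: simpler
-- what changed: B replaces A's append-all-scored-tuples-then-reverse-sort-and-take-head with a single pass keeping one running-best tuple (strict > update), never building or sorting the intermediate list.
import Mathlib
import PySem

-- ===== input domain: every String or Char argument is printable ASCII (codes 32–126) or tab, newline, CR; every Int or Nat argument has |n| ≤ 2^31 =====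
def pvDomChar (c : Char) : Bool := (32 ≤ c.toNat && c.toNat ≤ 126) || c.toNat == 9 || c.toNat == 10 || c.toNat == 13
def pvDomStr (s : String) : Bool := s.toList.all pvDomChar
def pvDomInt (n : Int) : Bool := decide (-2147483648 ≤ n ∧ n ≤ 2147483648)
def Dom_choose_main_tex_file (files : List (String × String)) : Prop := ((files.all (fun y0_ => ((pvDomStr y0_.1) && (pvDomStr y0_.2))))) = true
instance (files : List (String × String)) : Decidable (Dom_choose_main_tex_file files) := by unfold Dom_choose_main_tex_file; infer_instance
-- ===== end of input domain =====

-- B replaces A's build-list-then-reverse-sort with a single pass keeping one running-best tuple (simpler; no intermediate list).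
-- Both Pythons raise ValueError when no '.tex' entry exists; Pre_ excludes exactly those inputs.

-- Python tuples compare lexicographically: encoded by the lex product key pvKey (shared by both ports).
abbrev PvT := Int × Int × String × String
def pvKey (x : PvT) : Int ×ₗ (Int ×ₗ (String ×ₗ String)) := toLex (x.1, toLex (x.2.1, toLex (x.2.2.1, x.2.2.2)))

-- ===== PORT A =====
-- A's inline scoring block, transliterated: score starts at 0 and is bumped by sequential ifs.
def pvScoreA (name text : String) : Int :=
  let lowered_name := PySem.Str.lower name
  let lowered_text := PySem.Str.lower text
  let score : Int := 0
  let score := if PySem.Str.isIn "\\begin{document}" lowered_text then score + 100 else score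
  let score := if PySem.Str.isIn "\\title" lowered_text then score + 15 else score
  let score := if PySem.Str.isIn "\\abstract" lowered_text || PySem.Str.isIn "\\begin{abstract}" lowered_text then score + 10 else score
  let score := if PySem.Str.isIn "main" lowered_name then score + 8 else score
  score

def choose_main_tex_file (files : List (String × String)) : String × String :=
  let scored : List PvT := files.foldl (fun scored nt =>
    if PySem.Str.endswith (PySem.Str.lower nt.1) ".tex" then
      scored ++ [(pvScoreA nt.1 nt.2, (PySem.Str.len nt.2 : Int), nt.1, nt.2)]
    else scored) []
  -- scored.sort(reverse=True): Python's default tuple order is the lex order named by pvKey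
  match PySem.List.sorted scored pvKey true with
  | [] => ("", "")  -- Python raises ValueError here; excluded by Pre_
  | (_, _, name, text) :: _ => (name, text)

-- ===== PORT B =====
def pvScoreB (name text : String) : Int :=
  let lowered_name := PySem.Str.lower name
  let lowered_text := PySem.Str.lower text
  (if PySem.Str.isIn "\\begin{document}" lowered_text then (100 : Int) else 0)
  + (if PySem.Str.isIn "\\title" lowered_text then 15 else 0)
  + (if PySem.Str.isIn "\\abstract" lowered_text || PySem.Str.isIn "\\begin{abstract}" lowered_text then 10 else 0)
  + (if PySem.Str.isIn "main" lowered_name then 8 else 0)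

def choose_main_tex_file_alt (files : List (String × String)) : String × String :=
  let best : Option PvT := files.foldl (fun best nt =>
    if PySem.Str.endswith (PySem.Str.lower nt.1) ".tex" then
      let cand : PvT := (pvScoreB nt.1 nt.2, (PySem.Str.len nt.2 : Int), nt.1, nt.2)
      match best with
      | none => some cand
      | some b => if pvKey b < pvKey cand then some cand else some b  -- 'cand > best' on Python tuples
    else best) none
  match best with
  | some (_, _, name, text) => (name, text)
  | none => ("", "")  -- Python raises ValueError here; excluded by Pre_

-- ===== PRECONDITION & SPEC =====
-- Pre_ excludes exactly the inputs with no '.tex' entry, on which both Pythons raise ValueError.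
def Pre_choose_main_tex_file (files : List (String × String)) : Prop :=
  (files.any (fun nt => PySem.Str.endswith (PySem.Str.lower nt.1) ".tex")) = true
instance (files : List (String × String)) : Decidable (Pre_choose_main_tex_file files) := by unfold Pre_choose_main_tex_file; infer_instance
def pvWitness_choose_main_tex_file : (List (String × String)) := [("main.tex", "\\begin{document}hi")]
def Spec_choose_main_tex_file (files : List (String × String)) (out : String × String) : Prop := out = choose_main_tex_file_alt files
instance (files : List (String × String)) (out : String × String) : Decidable (Spec_choose_main_tex_file files out) := by unfold Spec_choose_main_tex_file; infer_instance

-- ===== CLAIM (what is proved, stated in full; the proofs are below) =====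
def Claim_equal_choose_main_tex_file : Prop := ∀ (files : List (String × String)), Dom_choose_main_tex_file files → Pre_choose_main_tex_file files → Spec_choose_main_tex_file files (choose_main_tex_file files)

-- ===== LEMMAS AND PROOFS =====
def pvTex (nt : String × String) : Bool := PySem.Str.endswith (PySem.Str.lower nt.1) ".tex"
def pvCand (nt : String × String) : PvT := (pvScoreB nt.1 nt.2, (PySem.Str.len nt.2 : Int), nt.1, nt.2)
def pvStep (b : Option PvT) (c : PvT) : Option PvT :=
  match b with
  | none => some c
  | some x => if pvKey x < pvKey c then some c else some x

theorem pvScore_eq (name text : String) : pvScoreA name text = pvScoreB name text := by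
  simp only [pvScoreA, pvScoreB]
  split_ifs <;> omega

theorem pvKey_inj {x y : PvT} (h : pvKey x = pvKey y) : x = y := by
  obtain ⟨a1,a2,a3,a4⟩ := x; obtain ⟨b1,b2,b3,b4⟩ := y
  simpa [pvKey, Prod.ext_iff] using h

theorem pvScoredA_eq (files : List (String × String)) :
    files.foldl (fun scored nt =>
      if PySem.Str.endswith (PySem.Str.lower nt.1) ".tex" then
        scored ++ [(pvScoreA nt.1 nt.2, (PySem.Str.len nt.2 : Int), nt.1, nt.2)]
      else scored) [] = (files.filter pvTex).map pvCand := by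
  have h := PySem.List.foldl_append_if (l := files) (acc := ([] : List PvT)) (p := pvTex) (f := pvCand)
  simpa [pvTex, pvCand, pvScore_eq] using h

theorem pvBfold_eq (files : List (String × String)) (b : Option PvT) :
    files.foldl (fun best nt =>
      if PySem.Str.endswith (PySem.Str.lower nt.1) ".tex" then
        let cand : PvT := (pvScoreB nt.1 nt.2, (PySem.Str.len nt.2 : Int), nt.1, nt.2)
        match best with
        | none => some cand
        | some b => if pvKey b < pvKey cand then some cand else some b
      else best) b = ((files.filter pvTex).map pvCand).foldl pvStep b := by
  induction files generalizing b with
  | nil => rfl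
  | cons nt rest ih =>
    by_cases h : PySem.Str.endswith (PySem.Str.lower nt.1) ".tex" = true
    · have h' : pvTex nt = true := h
      simp only [List.foldl_cons, List.filter_cons, if_pos h, if_pos h', List.map_cons, ih]
      rfl
    · have h' : ¬ (pvTex nt = true) := h
      simp only [List.foldl_cons, List.filter_cons, if_neg h, if_neg h', ih]

theorem pvFoldMax (l : List PvT) (b : PvT) :
    ∃ m, l.foldl pvStep (some b) = some m ∧ m ∈ b :: l ∧ ∀ y ∈ b :: l, pvKey y ≤ pvKey m := by
  induction l generalizing b with
  | nil => exact ⟨b, rfl, by simp, by simp⟩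
  | cons c rest ih =>
    by_cases h : pvKey b < pvKey c
    · obtain ⟨m, hm, hmem, hub⟩ := ih c
      rw [List.mem_cons] at hmem
      refine ⟨m, ?_, ?_, ?_⟩
      · simpa [pvStep, h] using hm
      · rcases hmem with h1 | h1 <;> simp [List.mem_cons, h1]
      · intro y hy
        simp only [List.mem_cons] at hy
        rcases hy with h1 | h1 | h1
        · exact le_trans (le_of_lt (h1 ▸ h)) (hub c (List.mem_cons_self))
        · exact hub y (by simp [List.mem_cons, h1])
        · exact hub y (by simp [List.mem_cons, h1])
    · obtain ⟨m, hm, hmem, hub⟩ := ih b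
      rw [List.mem_cons] at hmem
      refine ⟨m, ?_, ?_, ?_⟩
      · simpa [pvStep, h] using hm
      · rcases hmem with h1 | h1 <;> simp [List.mem_cons, h1]
      · intro y hy
        simp only [List.mem_cons] at hy
        rcases hy with h1 | h1 | h1
        · exact hub y (by simp [List.mem_cons, h1])
        · exact le_trans (le_of_not_gt (h1 ▸ h)) (hub b (List.mem_cons_self))
        · exact hub y (by simp [List.mem_cons, h1])

-- ===== VERDICT (by name: the statement is the Claim_ definition above) =====
theorem choose_main_tex_file_spec : Claim_equal_choose_main_tex_file := by
  intro files _ hpre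
  unfold Spec_choose_main_tex_file choose_main_tex_file choose_main_tex_file_alt
  rw [pvScoredA_eq, pvBfold_eq]
  set L := (files.filter pvTex).map pvCand with hL
  have hLne : L ≠ [] := by
    unfold Pre_choose_main_tex_file at hpre
    rw [List.any_eq_true] at hpre
    obtain ⟨nt, hmem, htex⟩ := hpre
    have h1 : nt ∈ files.filter pvTex := List.mem_filter.mpr ⟨hmem, htex⟩
    exact List.ne_nil_of_mem (List.mem_map_of_mem h1)
  obtain ⟨b, rest, hcons⟩ := List.exists_cons_of_ne_nil hLne
  -- B side: running max
  have hfold : L.foldl pvStep none = rest.foldl pvStep (some b) := by rw [hcons]; rfl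
  obtain ⟨m, hm, hmem, hub⟩ := pvFoldMax rest b
  have hmemL : m ∈ L := by rw [hcons]; exact hmem
  have hubL : ∀ y ∈ L, pvKey y ≤ pvKey m := by rw [hcons]; exact hub
  -- A side: head of reverse-sorted list
  have hsne : PySem.List.sorted L pvKey true ≠ [] := by
    rw [Ne, PySem.List.sorted_eq_nil_iff]; exact hLne
  obtain ⟨m', rest', hcons'⟩ := List.exists_cons_of_ne_nil hsne
  have hm'mem : m' ∈ L := by
    have h1 : m' ∈ PySem.List.sorted L pvKey true := by rw [hcons']; exact List.mem_cons_self
    exact (PySem.List.mem_sorted L pvKey true m').mp h1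
  have hm'ub : ∀ y ∈ L, pvKey y ≤ pvKey m' := PySem.List.key_head_sorted_rev_ge L pvKey hcons'
  have : m = m' := pvKey_inj (le_antisymm (hm'ub m hmemL) (hubL m' hm'mem))
  show (match PySem.List.sorted L pvKey true with
        | [] => (("" : String), ("" : String))
        | (_, _, name, text) :: _ => (name, text)) =
       (match L.foldl pvStep none with
        | some (_, _, name, text) => (name, text)
        | none => ("", ""))
  rw [hcons', hfold, hm, this]
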